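-- pv_equiv track=rewrite | github.com/mcamasanz/ProSimNet | libs/adsColumnLibs.py | _clean_LOG_
-- ===== SOURCE A (Python) =====
-- from collections import defaultdict
--
-- def _clean_LOG_(t_log, VAR_log):
--     var_by_time = defaultdict(list)
--     for t, v in zip(t_log, VAR_log):
--         var_by_time[t].append(v)
--
--     # Ordena los tiempos únicos
--     unique_times = sorted(var_by_time.keys())
--     t_clean = []
--     VAR_clean = []
--
--     for t in unique_times:
--         t_clean.append(t)
--         VAR_clean.append(var_by_time[t][-1])  # el último valor para ese tiempo
--
--     return t_clean, VAR_clean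
-- ===== SOURCE B (Python) =====
-- def _clean_LOG_(t_log, VAR_log):
--     pairs = sorted(zip(t_log, VAR_log), key=lambda p: p[0])
--     t_clean = []
--     VAR_clean = []
--     for t, v in pairs:
--         if t_clean and t_clean[-1] == t:
--             VAR_clean[-1] = v
--         else:
--             t_clean.append(t)
--             VAR_clean.append(v)
--     return t_clean, VAR_clean
-- ===== Notes on version B (the rewrite author's own statement) =====
-- stated objective: alternative
-- what changed: Replaced the defaultdict-of-lists grouping plus sorted(keys) lookup pass with a stable sort of the zipped (time, value) records followed by a single adjacency-collapsing pass that overwrites the last value on a repeated time.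
import Mathlib
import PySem

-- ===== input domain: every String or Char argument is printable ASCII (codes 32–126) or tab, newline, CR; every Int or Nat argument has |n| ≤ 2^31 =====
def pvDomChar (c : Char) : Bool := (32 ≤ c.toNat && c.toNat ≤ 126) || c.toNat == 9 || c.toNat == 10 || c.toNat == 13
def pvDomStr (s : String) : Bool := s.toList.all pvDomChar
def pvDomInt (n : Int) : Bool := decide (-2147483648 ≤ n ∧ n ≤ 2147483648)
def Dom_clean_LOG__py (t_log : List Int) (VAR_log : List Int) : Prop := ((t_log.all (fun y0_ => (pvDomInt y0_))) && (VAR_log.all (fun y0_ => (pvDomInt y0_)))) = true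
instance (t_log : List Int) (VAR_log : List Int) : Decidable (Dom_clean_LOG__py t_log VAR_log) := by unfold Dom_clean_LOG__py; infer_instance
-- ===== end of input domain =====

-- B replaces A's defaultdict grouping + sorted(keys) with a stable sort of the
-- zipped records and one adjacency-collapsing pass (alternative decomposition, same cost).

-- ===== PORT A =====
-- var_by_time[t][-1]: ported as pyGetD … (-1) 0; for every key t the group list is
-- nonempty, so the default 0 is never used and Python never raises here.
def clean_LOG__py (t_log : List Int) (VAR_log : List Int) : List Int × List Int :=
  let var_by_time := (t_log.zip VAR_log).foldl
    (fun d p => d.modify p.1 [] (fun l => l ++ [p.2])) PySem.Dict.empty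
  let unique_times := PySem.List.sorted var_by_time.keys (fun x => x) false
  unique_times.foldl
    (fun acc t => (acc.1 ++ [t], acc.2 ++ [PySem.List.pyGetD (var_by_time.getD t []) (-1) 0]))
    (([] : List Int), ([] : List Int))

-- ===== PORT B =====
-- 'VAR_clean[-1] = v' is ported as dropLast ++ [v]; 'if t_clean and t_clean[-1] == t'
-- as the nonemptiness-guarded pyGetD (-1) test.
def clean_LOG__py_alt (t_log : List Int) (VAR_log : List Int) : List Int × List Int :=
  let pairs := PySem.List.sorted (t_log.zip VAR_log) (fun p => p.1) false
  pairs.foldl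
    (fun acc p =>
      if acc.1 ≠ [] ∧ PySem.List.pyGetD acc.1 (-1) 0 = p.1 then
        (acc.1, acc.2.dropLast ++ [p.2])
      else
        (acc.1 ++ [p.1], acc.2 ++ [p.2]))
    (([] : List Int), ([] : List Int))

-- ===== PRECONDITION & SPEC =====
def Spec_clean_LOG__py (t_log : List Int) (VAR_log : List Int) (out : List Int × List Int) : Prop := out = clean_LOG__py_alt t_log VAR_log
instance (t_log : List Int) (VAR_log : List Int) (out : List Int × List Int) : Decidable (Spec_clean_LOG__py t_log VAR_log out) := by unfold Spec_clean_LOG__py; infer_instance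

-- ===== CLAIM (what is proved, stated in full; the proofs are below) =====
def Claim_equal_clean_LOG__py : Prop := ∀ (t_log : List Int) (VAR_log : List Int), Dom_clean_LOG__py t_log VAR_log → Spec_clean_LOG__py t_log VAR_log (clean_LOG__py t_log VAR_log)

-- ===== LEMMAS AND PROOFS =====

-- the last value logged at time t, as both programs compute it
def pvLastAt (z : List (Int × Int)) (t : Int) : Int :=
  PySem.List.pyGetD ((z.filter (fun q => q.1 == t)).map (fun q => q.2)) (-1) 0

-- PySem.Set.ofList keeps a subsequence of its argument
theorem pv_ofList_sublist {α : Type} [BEq α] [LawfulBEq α] (l : List α) :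
    (PySem.Set.ofList l).Sublist l := by
  induction l with
  | nil => simp [PySem.Set.ofList_nil]
  | cons x xs ih =>
    rw [PySem.Set.ofList_cons]
    exact List.Sublist.cons₂ x (List.Sublist.trans List.filter_sublist ih)

theorem pv_ofList_pairwise {α : Type} [BEq α] [LawfulBEq α] {R : α → α → Prop} {l : List α}
    (h : l.Pairwise R) : (PySem.Set.ofList l).Pairwise R :=
  h.sublist (pv_ofList_sublist l)

-- stability of PySem's insertion sort: filtering on one key value is unchanged by one insertion
theorem pv_insertBy_filter (key : Int × Int → Int) (x : Int × Int) (c : Int) :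
    ∀ (acc : List (Int × Int)), acc.Pairwise (fun a b => key a ≤ key b) →
      (PySem.List.insertBy (fun a b => decide (key a < key b)) x acc).filter (fun a => key a == c)
        = acc.filter (fun a => key a == c) ++ (if key x == c then [x] else []) := by
  intro acc
  induction acc with
  | nil =>
    intro _
    by_cases hc : (key x == c) = true <;>
      simp [PySem.List.insertBy, hc]
  | cons y ys ih =>
    intro hp
    rw [show PySem.List.insertBy (fun a b => decide (key a < key b)) x (y :: ys)
        = if decide (key x < key y) = true then x :: y :: ys
          else y :: PySem.List.insertBy (fun a b => decide (key a < key b)) x ys from rfl]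
    by_cases hlt : key x < key y
    · simp only [decide_eq_true_eq, hlt, if_true]
      by_cases hc : (key x == c) = true
      · -- every element of y :: ys has key > key x = c, so it filters to []
        have hxc : key x = c := by simpa using hc
        have hnil : (y :: ys).filter (fun a => key a == c) = [] := by
          rw [List.filter_eq_nil_iff]
          intro a ha
          have hya : key y ≤ key a := by
            rcases List.mem_cons.mp ha with rfl | ha
            · exact le_refl _
            · exact (List.pairwise_cons.mp hp).1 a ha
          have : key a ≠ c := by omega
          simpa using this
        simp [hc, hnil]
      · simp [List.filter_cons, hc]
    · simp only [decide_eq_true_eq, hlt, if_false]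
      rw [List.filter_cons, List.filter_cons, ih (List.pairwise_cons.mp hp).2]
      by_cases hyc : (key y == c) = true <;> simp [hyc]

-- stability of PySem's sort: the sublist of records with one given key is unchanged
theorem pv_sorted_filter (key : Int × Int → Int) (c : Int) (z : List (Int × Int)) :
    (PySem.List.sorted z key false).filter (fun a => key a == c)
      = z.filter (fun a => key a == c) := by
  induction z using List.reverseRecOn with
  | nil => simp [PySem.List.sorted_eq_foldl_insertBy]
  | append_singleton zs x ih =>
    have h1 : PySem.List.sorted (zs ++ [x]) key false
        = PySem.List.insertBy (fun a b => decide (key a < key b)) x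
            (PySem.List.sorted zs key false) := by
      rw [PySem.List.sorted_eq_foldl_insertBy, PySem.List.sorted_eq_foldl_insertBy,
        List.foldl_append]
      rfl
    rw [h1, pv_insertBy_filter key x c _ (PySem.List.sorted_pairwise zs key),
      List.filter_append, ih]
    by_cases hc : (key x == c) = true <;> simp [hc]

-- characterisation of B's collapsing pass on a key-sorted pair list
theorem pv_collapse_char (ps : List (Int × Int))
    (hp : ps.Pairwise (fun a b => a.1 ≤ b.1)) :
    ps.foldl
      (fun acc p =>
        if acc.1 ≠ [] ∧ PySem.List.pyGetD acc.1 (-1) 0 = p.1 then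
          (acc.1, acc.2.dropLast ++ [p.2])
        else
          (acc.1 ++ [p.1], acc.2 ++ [p.2]))
      (([] : List Int), ([] : List Int))
    = (PySem.Set.ofList (ps.map (fun q => q.1)),
       (PySem.Set.ofList (ps.map (fun q => q.1))).map (pvLastAt ps)) := by
  induction ps using List.reverseRecOn with
  | nil => simp [PySem.Set.ofList_nil]
  | append_singleton ps p ih =>
    have hps : ps.Pairwise (fun a b => a.1 ≤ b.1) :=
      hp.sublist (List.sublist_append_left ps [p])
    have hle : ∀ a ∈ ps, a.1 ≤ p.1 := by
      intro a ha
      exact (List.pairwise_append.mp hp).2.2 a ha p (by simp)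
    set K : List Int := PySem.Set.ofList (ps.map (fun q => q.1)) with hK
    have hKnd : K.Nodup := PySem.Set.nodup_ofList _
    have hKle : ∀ k ∈ K, k ≤ p.1 := by
      intro k hk
      rw [hK, PySem.Set.mem_ofList, List.mem_map] at hk
      obtain ⟨a, ha, rfl⟩ := hk
      exact hle a ha
    have hKsorted : K.Pairwise (fun a b => a ≤ b) :=
      pv_ofList_pairwise (hps.map _ (by intro a b h; exact h))
    have hK' : PySem.Set.ofList ((ps ++ [p]).map (fun q => q.1)) = PySem.Set.add K p.1 := by
      rw [List.map_append, List.map_singleton, PySem.Set.ofList_append_singleton]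
    have hlast : ∀ t, t ≠ p.1 → pvLastAt (ps ++ [p]) t = pvLastAt ps t := by
      intro t ht
      unfold pvLastAt
      rw [List.filter_append]
      simp [Ne.symm ht]
    have hlastp : pvLastAt (ps ++ [p]) p.1 = p.2 := by
      unfold pvLastAt
      rw [List.filter_append]
      simp only [List.filter_cons, beq_self_eq_true, if_true, List.filter_nil, List.map_append]
      exact PySem.List.pyGetD_neg_one_append_singleton _ _ _
    rw [List.foldl_append, ih hps, List.foldl_cons, List.foldl_nil, hK']
    by_cases hmem : p.1 ∈ K
    · -- repeated time: the last entry of t_clean is p.1; overwrite the last value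
      have hKne : K ≠ [] := by rintro h; rw [h] at hmem; simp at hmem
      have hgl : K.getLast hKne = p.1 := by
        have h1 : K.getLast hKne ≤ p.1 := hKle _ (K.getLast_mem hKne)
        have h2 : p.1 ≤ K.getLast hKne := by
          obtain ⟨i, hi, hig⟩ := List.mem_iff_getElem.mp hmem
          rw [K.getLast_eq_getElem]
          rcases Nat.lt_or_ge i (K.length - 1) with hl | hg
          · rw [← hig]
            exact List.pairwise_iff_getElem.mp hKsorted i (K.length - 1) hi (by omega) hl
          · have hieq : i = K.length - 1 := by omega
            rw [← hig]
            apply le_of_eq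
            congr 1
        omega
      have hcond : (K ≠ [] ∧ PySem.List.pyGetD K (-1) 0 = p.1) :=
        ⟨hKne, by rw [PySem.List.pyGetD_neg_one K 0 hKne, hgl]⟩
      rw [if_pos hcond, PySem.Set.add_of_mem hmem]
      -- K = K.dropLast ++ [p.1], with p.1 not in K.dropLast
      have hdecomp : K = K.dropLast ++ [p.1] := by
        conv_lhs => rw [← List.dropLast_append_getLast hKne]
        rw [hgl]
      have hnotmem : p.1 ∉ K.dropLast := by
        intro hmem'
        have hnd2 : (K.dropLast ++ [p.1]).Nodup := hdecomp ▸ hKnd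
        rw [List.nodup_append] at hnd2
        exact hnd2.2.2 p.1 hmem' p.1 (List.mem_singleton.mpr rfl) rfl
      refine Prod.ext rfl ?_
      show (K.map (pvLastAt ps)).dropLast ++ [p.2] = K.map (pvLastAt (ps ++ [p]))
      conv_rhs => rw [hdecomp]
      rw [List.map_append, List.map_singleton, hlastp]
      conv_lhs => rw [hdecomp, List.map_append, List.map_singleton, List.dropLast_concat]
      congr 1
      exact List.map_congr_left (fun t ht => (hlast t (fun h => hnotmem (h ▸ ht))).symm)
    · -- new time: append
      have hcond : ¬(K ≠ [] ∧ PySem.List.pyGetD K (-1) 0 = p.1) := by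
        rintro ⟨hne, hlastK⟩
        rw [PySem.List.pyGetD_neg_one K 0 hne] at hlastK
        exact hmem (hlastK ▸ K.getLast_mem hne)
      rw [if_neg hcond, PySem.Set.add_of_not_mem hmem]
      refine Prod.ext rfl ?_
      show K.map (pvLastAt ps) ++ [p.2] = (K ++ [p.1]).map (pvLastAt (ps ++ [p]))
      rw [List.map_append, List.map_singleton, hlastp]
      congr 1
      exact List.map_congr_left (fun t ht => (hlast t (fun h => hmem (h ▸ ht))).symm)

-- ===== VERDICT (by name: the statement is the Claim_ definition above) =====
theorem clean_LOG__py_spec : Claim_equal_clean_LOG__py := by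
  intro t_log VAR_log _
  unfold Spec_clean_LOG__py clean_LOG__py clean_LOG__py_alt
  set z := t_log.zip VAR_log with hz
  dsimp only
  set d := List.foldl (fun d p => d.modify p.1 [] fun l => l ++ [p.2]) PySem.Dict.empty z with hd
  have hkeys0 : d.keys = PySem.Set.ofList (z.map (fun p => p.1)) := by
    rw [hd, PySem.Dict.keys_foldl_modify_key z (fun p => p.1) [] (fun _ p => fun l => l ++ [p.2]),
      PySem.Dict.keys_empty, PySem.Set.update_nil_left]
  have hgetD : ∀ t : Int, d.getD t [] = (z.filter (fun p => p.1 == t)).map (fun q => q.2) := by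
    intro t
    rw [hd, PySem.Dict.getD_foldl_modify_append z PySem.Dict.empty t, PySem.Dict.getD_empty,
      List.nil_append]
  -- A's side: two independent appending loops, in closed form
  rw [PySem.List.foldl_prod_mk
    (f := fun (acc : List Int) (t : Int) => acc ++ [t])
    (g := fun (acc : List Int) (t : Int) =>
      acc ++ [PySem.List.pyGetD (d.getD t []) (-1) 0])]
  rw [PySem.List.foldl_append_singleton_eq_map, PySem.List.foldl_append_singleton_eq_map]
  simp only [List.nil_append, List.map_id']
  -- B's side: the collapsing pass in closed form
  rw [pv_collapse_char (PySem.List.sorted z (fun p => p.1) false)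
    (PySem.List.sorted_pairwise z (fun p => p.1))]
  -- the two key lists agree
  have hkeys : PySem.Set.ofList ((PySem.List.sorted z (fun p => p.1) false).map (fun q => q.1))
      = PySem.List.sorted d.keys (fun x => x) false := by
    rw [hkeys0]
    refine (PySem.List.sorted_eq_of_perm_of_pairwise_lt _ _ _ ?_ ?_).symm
    · rw [List.perm_ext_iff_of_nodup (PySem.Set.nodup_ofList _) (PySem.Set.nodup_ofList _)]
      intro a
      rw [PySem.Set.mem_ofList, PySem.Set.mem_ofList, List.mem_map, List.mem_map]
      constructor
      · rintro ⟨q, hq, rfl⟩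
        exact ⟨q, (PySem.List.mem_sorted z _ false q).mp hq, rfl⟩
      · rintro ⟨q, hq, rfl⟩
        exact ⟨q, (PySem.List.mem_sorted z _ false q).mpr hq, rfl⟩
    · have hle : (PySem.Set.ofList ((PySem.List.sorted z (fun p => p.1) false).map
          (fun q => q.1))).Pairwise (fun a b => a ≤ b) :=
        pv_ofList_pairwise (PySem.List.sorted_map_key_pairwise z (fun p => p.1))
      exact (hle.and (PySem.Set.nodup_ofList _)).imp (fun h => lt_of_le_of_ne h.1 h.2)
  rw [← hkeys]
  -- the per-time values agree: sorting is stable, so each time's group is unchanged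
  refine Prod.ext rfl ?_
  refine List.map_congr_left (fun t _ => ?_)
  show PySem.List.pyGetD (d.getD t []) (-1) 0
      = pvLastAt (PySem.List.sorted z (fun p => p.1) false) t
  rw [hgetD t]
  show pvLastAt z t = pvLastAt (PySem.List.sorted z (fun p => p.1) false) t
  unfold pvLastAt
  rw [pv_sorted_filter (fun q => q.1) t z]
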